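-- pv_equiv track=rewrite | github.com/aritako/cs138-ps | last_stand/lib/solution.py | compute_damage_vector
-- ===== SOURCE A (Python) =====
-- DAMAGE_MULTIPLIERS = {
--   "G" : [0, 4, 0],
--   "T" : [1, 1, 1],
--   "R" : [0, 2, 0],
--   "P" : [0, 1, 0],
--   "W" : [0, 2, 0],
-- }
--
-- def compute_damage_vector(symbols):
--   damage_vector = [0, 0, 0]
--   last_W_index = symbols.rfind('W')
--   for idx, i in enumerate(symbols):
--     if i == 'W' and idx != last_W_index:
--       continue
--     if i == 'W' and idx == last_W_index:
--       damage_vector[1] *= DAMAGE_MULTIPLIERS[i][1]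
--     else:
--       damage_vector[0] += DAMAGE_MULTIPLIERS[i][0]
--       damage_vector[1] += DAMAGE_MULTIPLIERS[i][1]
--       damage_vector[2] += DAMAGE_MULTIPLIERS[i][2]
--   # for i in range(3):
--   #   damage_vector[i] = mp.mpf(damage_vector[i])
--   return damage_vector
-- ===== SOURCE B (Python) =====
-- DAMAGE_MULTIPLIERS = {
--   "G" : [0, 4, 0],
--   "T" : [1, 1, 1],
--   "R" : [0, 2, 0],
--   "P" : [0, 1, 0],
--   "W" : [0, 2, 0],
-- }
--
-- def compute_damage_vector(symbols):
--   # Every multiplier row has m[0] == m[2], and the last 'W' doubles the middle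
--   # component accumulated so far: final dv[1] = 2*(middle sum before the last
--   # 'W') + (middle sum after it).  So one pass with a position test against the
--   # precomputed last-'W' index suffices; non-middle components are one total.
--   last_w = symbols.rfind('W')
--   total = 0
--   mid = 0
--   for idx, ch in enumerate(symbols):
--     if ch != 'W':
--       m = DAMAGE_MULTIPLIERS[ch]
--       total += m[0]
--       mid += 2 * m[1] if idx < last_w else m[1]
--   return [total, mid, total]
-- ===== Notes on version B (the rewrite author's own statement) =====
-- stated objective: alternative
-- what changed: Replaces A's three-branch loop with an in-place multiply at the last 'W' by a single pass that doubles each middle contribution positioned before the precomputed last-'W' index, and emits [total, mid, total] using the m[0]==m[2] symmetry of the multiplier table.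
import Mathlib
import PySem

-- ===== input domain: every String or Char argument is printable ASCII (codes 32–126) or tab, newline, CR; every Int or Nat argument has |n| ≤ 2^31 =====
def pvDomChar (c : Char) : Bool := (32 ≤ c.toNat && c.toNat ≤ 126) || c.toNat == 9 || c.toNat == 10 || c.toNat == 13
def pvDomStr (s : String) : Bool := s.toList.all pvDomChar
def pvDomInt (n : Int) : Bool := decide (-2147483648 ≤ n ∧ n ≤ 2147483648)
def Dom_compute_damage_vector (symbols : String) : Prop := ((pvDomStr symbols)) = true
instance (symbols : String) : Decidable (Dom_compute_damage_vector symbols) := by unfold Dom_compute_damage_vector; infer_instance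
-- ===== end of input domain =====

-- B replaces the in-place doubling at the last 'W' by position-conditioned doubled
-- middle contributions and one shared total for the outer components (alternative
-- decomposition, same O(n) cost). Pre_ excludes symbols with characters outside
-- "GTRPW", on which Python A raises KeyError.


-- ===== PORT A =====
def DAMAGE_MULTIPLIERS : PySem.Dict String (List Int) :=
  (((((PySem.Dict.empty).insert "G" [0, 4, 0]).insert "T" [1, 1, 1]).insert
      "R" [0, 2, 0]).insert "P" [0, 1, 0]).insert "W" [0, 2, 0]

-- loop body of A (dict lookup ported with getD; KeyError inputs are excluded by Pre_)
def pvStepA (last_W_index : Int) (dv : List Int) (p : Int × Char) : List Int :=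
  if p.2 = 'W' ∧ p.1 ≠ last_W_index then dv
  else if p.2 = 'W' ∧ p.1 = last_W_index then
    dv.set 1 (PySem.List.pyGetD dv 1 0 *
      PySem.List.pyGetD (DAMAGE_MULTIPLIERS.getD (String.ofList [p.2]) [0, 0, 0]) 1 0)
  else
    let m := DAMAGE_MULTIPLIERS.getD (String.ofList [p.2]) [0, 0, 0]
    ((dv.set 0 (PySem.List.pyGetD dv 0 0 + PySem.List.pyGetD m 0 0)).set 1
        (PySem.List.pyGetD dv 1 0 + PySem.List.pyGetD m 1 0)).set 2
      (PySem.List.pyGetD dv 2 0 + PySem.List.pyGetD m 2 0)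

def compute_damage_vector (symbols : String) : List Int :=
  let damage_vector : List Int := [0, 0, 0]
  let last_W_index : Int := PySem.Str.rfind symbols "W"
  (PySem.List.enumerate symbols.toList).foldl (pvStepA last_W_index) damage_vector

-- ===== PORT B =====
-- loop body of B: one (total, mid) accumulator, doubling mid-contributions before last_w
def pvStepB (last_w : Int) (tm : Int × Int) (p : Int × Char) : Int × Int :=
  if p.2 ≠ 'W' then
    let m := DAMAGE_MULTIPLIERS.getD (String.ofList [p.2]) [0, 0, 0]
    (tm.1 + PySem.List.pyGetD m 0 0,
     tm.2 + (if p.1 < last_w then 2 * PySem.List.pyGetD m 1 0 else PySem.List.pyGetD m 1 0))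
  else tm

def compute_damage_vector_alt (symbols : String) : List Int :=
  let last_w : Int := PySem.Str.rfind symbols "W"
  let tm := (PySem.List.enumerate symbols.toList).foldl (pvStepB last_w) (0, 0)
  [tm.1, tm.2, tm.1]

-- ===== PRECONDITION & SPEC =====
-- Pre_ excludes symbols containing a character outside "GTRPW": on those Python A
-- raises KeyError (no return value).
def Pre_compute_damage_vector (symbols : String) : Prop :=
  (symbols.toList.all fun c => c == 'G' || c == 'T' || c == 'R' || c == 'P' || c == 'W') = true
instance (symbols : String) : Decidable (Pre_compute_damage_vector symbols) := by
  unfold Pre_compute_damage_vector; infer_instance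
def pvWitness_compute_damage_vector : String := "GTWRPWT"

def Spec_compute_damage_vector (symbols : String) (out : List Int) : Prop := out = compute_damage_vector_alt symbols
instance (symbols : String) (out : List Int) : Decidable (Spec_compute_damage_vector symbols out) := by unfold Spec_compute_damage_vector; infer_instance

-- ===== CLAIM (what is proved, stated in full; the proofs are below) =====
def Claim_equal_compute_damage_vector : Prop := ∀ (symbols : String), Dom_compute_damage_vector symbols → Pre_compute_damage_vector symbols → Spec_compute_damage_vector symbols (compute_damage_vector symbols)

-- ===== LEMMAS AND PROOFS =====

lemma pvPrefixSingle (s : List Char) (c : Char) (i : Nat) :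
    [c].isPrefixOf (s.drop i) = true ↔ s[i]? = some c := by
  rw [List.isPrefixOf_iff_prefix, ← List.head?_drop]
  constructor
  · rintro ⟨t, ht⟩; rw [← ht]; rfl
  · intro h
    cases hd : List.drop i s with
    | nil => simp [hd] at h
    | cons x xs =>
        rw [hd] at h
        simp at h
        exact ⟨xs, by simp [h]⟩

lemma pvGoZero (s sub : List Char) :
    PySem.Chars.rfind.go s sub 0 = if sub.isPrefixOf s then 0 else -1 := rfl

lemma pvGoSucc (s sub : List Char) (j : Nat) :
    PySem.Chars.rfind.go s sub (j + 1) =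
      if sub.isPrefixOf (s.drop (j + 1)) then ((j + 1 : Nat) : Int)
      else PySem.Chars.rfind.go s sub j := rfl

lemma pvGoLeSelf (s sub : List Char) (m : Nat) :
    PySem.Chars.rfind.go s sub m ≤ (m : Int) := by
  induction m with
  | zero => rw [pvGoZero]; split_ifs <;> norm_num
  | succ j ih => rw [pvGoSucc]; split_ifs <;> push_cast <;> omega

lemma pvGoGe (s : List Char) (c : Char) (j m : Nat)
    (hj : s[j]? = some c) (hjm : j ≤ m) :
    (j : Int) ≤ PySem.Chars.rfind.go s [c] m := by
  induction m with
  | zero =>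
      interval_cases j
      rw [pvGoZero]
      have : [c].isPrefixOf s = true := by
        have := (pvPrefixSingle s c 0).2 (by simpa using hj)
        simpa using this
      simp [this]
  | succ i ih =>
      rw [pvGoSucc]
      split_ifs with h
      · push_cast; omega
      · rcases Nat.lt_or_ge j (i + 1) with hlt | hge
        · exact ih (by omega)
        · have hji : j = i + 1 := by omega
          subst hji
          exact absurd ((pvPrefixSingle s c (i + 1)).2 hj) (by simpa using h)

lemma pvGoMem (s : List Char) (c : Char) (m : Nat)
    (h : 0 ≤ PySem.Chars.rfind.go s [c] m) :
    s[(PySem.Chars.rfind.go s [c] m).toNat]? = some c := by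
  induction m with
  | zero =>
      rw [pvGoZero] at h ⊢
      split_ifs at h ⊢ with hp
      · have := (pvPrefixSingle s c 0).1 (by simpa using hp)
        simpa using this
      · norm_num at h
  | succ i ih =>
      rw [pvGoSucc] at h ⊢
      split_ifs at h ⊢ with hp
      · have := (pvPrefixSingle s c (i + 1)).1 hp
        simpa using this
      · exact ih h

lemma pvRow (ch : Char) (h : ch = 'G' ∨ ch = 'T' ∨ ch = 'R' ∨ ch = 'P') :
    ∃ m0 m1 : Int,
      (∀ (k j t b : Int), pvStepA k [t, b, t] (j, ch) = [t + m0, b + m1, t + m0]) ∧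
      (∀ (k j t m : Int), pvStepB k (t, m) (j, ch) =
        (t + m0, m + (if j < k then 2 * m1 else m1))) := by
  have hG : DAMAGE_MULTIPLIERS.getD (String.ofList ['G']) [0, 0, 0] = [0, 4, 0] := by decide
  have hT : DAMAGE_MULTIPLIERS.getD (String.ofList ['T']) [0, 0, 0] = [1, 1, 1] := by decide
  have hR : DAMAGE_MULTIPLIERS.getD (String.ofList ['R']) [0, 0, 0] = [0, 2, 0] := by decide
  have hP : DAMAGE_MULTIPLIERS.getD (String.ofList ['P']) [0, 0, 0] = [0, 1, 0] := by decide
  rcases h with rfl | rfl | rfl | rfl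
  · exact ⟨0, 4, fun k j t b => by simp [pvStepA, hG, PySem.List.pyGetD, PySem.List.pyGet?, PySem.List.pyIdx?],
      fun k j t m => by simp [pvStepB, hG, PySem.List.pyGetD, PySem.List.pyGet?, PySem.List.pyIdx?]⟩
  · exact ⟨1, 1, fun k j t b => by simp [pvStepA, hT, PySem.List.pyGetD, PySem.List.pyGet?, PySem.List.pyIdx?],
      fun k j t m => by simp [pvStepB, hT, PySem.List.pyGetD, PySem.List.pyGet?, PySem.List.pyIdx?]⟩
  · exact ⟨0, 2, fun k j t b => by simp [pvStepA, hR, PySem.List.pyGetD, PySem.List.pyGet?, PySem.List.pyIdx?],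
      fun k j t m => by simp [pvStepB, hR, PySem.List.pyGetD, PySem.List.pyGet?, PySem.List.pyIdx?]⟩
  · exact ⟨0, 1, fun k j t b => by simp [pvStepA, hP, PySem.List.pyGetD, PySem.List.pyGet?, PySem.List.pyIdx?],
      fun k j t m => by simp [pvStepB, hP, PySem.List.pyGetD, PySem.List.pyGet?, PySem.List.pyIdx?]⟩

lemma pvStepA_lastW (k j t b : Int) (hjk : j = k) :
    pvStepA k [t, b, t] (j, 'W') = [t, b * 2, t] := by
  have hW : DAMAGE_MULTIPLIERS.getD ("W" : String) [0, 0, 0] = [0, 2, 0] := by decide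
  simp [pvStepA, hjk, hW, PySem.List.pyGetD, PySem.List.pyGet?, PySem.List.pyIdx?]

lemma pvMain (s : List Char) : ∀ (j k b t m : Int),
    (∀ ch ∈ s, ch = 'G' ∨ ch = 'T' ∨ ch = 'R' ∨ ch = 'P' ∨ ch = 'W') →
    (∀ p ∈ PySem.List.enumerate s j, p.2 = 'W' → p.1 ≤ k) →
    (∀ p ∈ PySem.List.enumerate s j, p.1 = k → p.2 = 'W') →
    k < j + s.length →
    (k < j → b = m) → (j ≤ k → m = 2 * b) →
    (PySem.List.enumerate s j).foldl (pvStepA k) [t, b, t] =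
      [((PySem.List.enumerate s j).foldl (pvStepB k) (t, m)).1,
       ((PySem.List.enumerate s j).foldl (pvStepB k) (t, m)).2,
       ((PySem.List.enumerate s j).foldl (pvStepB k) (t, m)).1] := by
  induction s with
  | nil =>
      intro j k b t m _ _ _ hlen hb _
      simp only [PySem.List.enumerate_nil, List.foldl_nil]
      have : b = m := hb (by simpa using hlen)
      rw [this]
  | cons ch s' ih =>
      intro j k b t m hpre hW hkW hlen hb hm
      rw [PySem.List.enumerate_cons]
      simp only [List.foldl_cons]
      have hW' : ∀ p ∈ PySem.List.enumerate s' (j + 1), p.2 = 'W' → p.1 ≤ k := by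
        intro p hp; exact hW p (by rw [PySem.List.enumerate_cons]; exact List.mem_cons_of_mem _ hp)
      have hkW' : ∀ p ∈ PySem.List.enumerate s' (j + 1), p.1 = k → p.2 = 'W' := by
        intro p hp; exact hkW p (by rw [PySem.List.enumerate_cons]; exact List.mem_cons_of_mem _ hp)
      have hlen' : k < (j + 1) + s'.length := by
        simp only [List.length_cons] at hlen; push_cast at hlen ⊢; omega
      have hpre' : ∀ c ∈ s', c = 'G' ∨ c = 'T' ∨ c = 'R' ∨ c = 'P' ∨ c = 'W' :=
        fun c hc => hpre c (List.mem_cons_of_mem _ hc)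
      by_cases hw : ch = 'W'
      · subst hw
        by_cases hjk : j = k
        · have hjle : j ≤ k := le_of_eq hjk
          rw [pvStepA_lastW k j t b hjk]
          have hsb : pvStepB k (t, m) (j, 'W') = (t, m) := by simp [pvStepB]
          rw [hsb]
          have : b * 2 = m := by rw [hm hjle]; ring
          rw [this]
          exact ih (j + 1) k m t m hpre' hW' hkW' hlen' (fun _ => rfl)
            (fun h => absurd h (by omega))
        · have hjle : j ≤ k := by
            have := hW (j, 'W') (by rw [PySem.List.enumerate_cons]; exact List.mem_cons_self ..) rfl
            simpa using this
          have hjlt : j < k := lt_of_le_of_ne hjle hjk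
          have hsa : pvStepA k [t, b, t] (j, 'W') = [t, b, t] := by
            simp [pvStepA, hjk]
          have hsb : pvStepB k (t, m) (j, 'W') = (t, m) := by simp [pvStepB]
          rw [hsa, hsb]
          exact ih (j + 1) k b t m hpre' hW' hkW' hlen'
            (fun h => absurd h (by omega)) (fun _ => hm hjle)
      · have hch : ch = 'G' ∨ ch = 'T' ∨ ch = 'R' ∨ ch = 'P' := by
          rcases hpre ch (List.mem_cons_self ..) with h | h | h | h | h
          · exact Or.inl h
          · exact Or.inr (Or.inl h)
          · exact Or.inr (Or.inr (Or.inl h))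
          · exact Or.inr (Or.inr (Or.inr h))
          · exact absurd h hw
        have hjk : j ≠ k := fun h => hw (hkW (j, ch)
          (by rw [PySem.List.enumerate_cons]; exact List.mem_cons_self ..) h)
        obtain ⟨m0, m1, hA, hB⟩ := pvRow ch hch
        rw [hA, hB]
        by_cases hlt : j < k
        · have hmm : m = 2 * b := hm (le_of_lt hlt)
          rw [if_pos hlt]
          have h2 : m + 2 * m1 = 2 * (b + m1) := by rw [hmm]; ring
          rw [h2]
          exact ih (j + 1) k (b + m1) (t + m0) (2 * (b + m1)) hpre' hW' hkW' hlen'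
            (fun h => absurd h (by omega)) (fun _ => rfl)
        · have hkj : k < j := by omega
          have hbm : b = m := hb hkj
          rw [if_neg hlt, ← hbm]
          exact ih (j + 1) k (b + m1) (t + m0) (b + m1) hpre' hW' hkW' hlen'
            (fun _ => rfl) (fun h => absurd h (by omega))

-- ===== VERDICT (by name: the statement is the Claim_ definition above) =====
theorem compute_damage_vector_spec : Claim_equal_compute_damage_vector := by
  intro symbols _ hpre
  unfold Spec_compute_damage_vector compute_damage_vector compute_damage_vector_alt
  set l := symbols.toList with hl
  have hpre' : ∀ ch ∈ l, ch = 'G' ∨ ch = 'T' ∨ ch = 'R' ∨ ch = 'P' ∨ ch = 'W' := by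
    intro ch hc
    unfold Pre_compute_damage_vector at hpre
    have := (List.all_eq_true.1 hpre) ch hc
    simp at this; tauto
  have hk : PySem.Str.rfind symbols "W" = PySem.Chars.rfind.go l ['W'] l.length := by
    rw [PySem.Str.rfind_eq]; rfl
  set k := PySem.Str.rfind symbols "W" with hkdef
  have hmemk : 0 ≤ k → l[k.toNat]? = some 'W' := by
    intro h0; rw [hk] at h0 ⊢; exact pvGoMem l 'W' l.length h0
  have hle : k ≤ (l.length : Int) := by rw [hk]; exact pvGoLeSelf l ['W'] l.length
  have hklt : k < (l.length : Int) := by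
    by_cases h0 : 0 ≤ k
    · have := hmemk h0
      obtain ⟨hlt, -⟩ := List.getElem?_eq_some_iff.1 this
      omega
    · omega
  have hW : ∀ p ∈ PySem.List.enumerate l 0, p.2 = 'W' → p.1 ≤ k := by
    intro p hp hpw
    rw [PySem.List.mem_enumerate_iff] at hp
    obtain ⟨i, hi, rfl⟩ := hp
    simp only at hpw ⊢
    have hji : l[i]? = some 'W' := by rw [List.getElem?_eq_getElem hi, hpw]
    have := pvGoGe l 'W' i l.length hji (le_of_lt hi)
    rw [hk]; omega
  have hkW : ∀ p ∈ PySem.List.enumerate l 0, p.1 = k → p.2 = 'W' := by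
    intro p hp hpk
    rw [PySem.List.mem_enumerate_iff] at hp
    obtain ⟨i, hi, rfl⟩ := hp
    simp only at hpk ⊢
    have h0 : 0 ≤ k := by omega
    have := hmemk h0
    have hki : k.toNat = i := by omega
    rw [hki, List.getElem?_eq_getElem hi] at this
    exact Option.some.injEq .. ▸ (by simpa using this)
  have := pvMain l 0 k 0 0 0 hpre' hW hkW (by omega) (fun _ => rfl) (fun _ => by ring)
  simpa using this
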